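-- pv_equiv track=rewrite | github.com/lunnlew/m3u-filter | backend/m3u_generator.py | _sort_group_by_template
-- ===== SOURCE A (Python) =====
-- from typing import List, Dict
--
-- def _sort_group_by_template(channels: List[Dict], channel_order: List[str]) -> List[Dict]:
--     """按照模板对频道进行排序
--
--     Args:
--         channels: 同一分组下的频道列表
--         channel_order: 该分组下的频道排序模板
--     """
--     if not channels or not channel_order:
--         return channels
--
--     # 创建排序映射，不区分大小写
--     order_map = {name.lower(): idx for idx, name in enumerate(channel_order)}
--
--     # 分离有序和无序频道
--     ordered_channels = []
--     unordered_channels = []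
--
--     for channel in channels:
--         display_name = channel.get('display_name', '')
--         if display_name.lower() in order_map:
--             ordered_channels.append((order_map[display_name.lower()], channel))
--         else:
--             unordered_channels.append(channel)
--
--     # 按模板顺序排序
--     final_channels = []
--     if ordered_channels:
--         final_channels.extend(ch for _, ch in sorted(ordered_channels, key=lambda x: x[0]))
--     if unordered_channels:
--         final_channels.extend(sorted(unordered_channels, key=lambda x: x.get('display_name', '').lower()))
--
--     return final_channels
-- ===== SOURCE B (Python) =====
-- from typing import List, Dict
--
-- def _sort_group_by_template(channels: List[Dict], channel_order: List[str]) -> List[Dict]: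
--     """Single stable sort with a composite key instead of partition + two sorts."""
--     if not channels or not channel_order:
--         return channels
--
--     order_map = {name.lower(): idx for idx, name in enumerate(channel_order)}
--     n = len(channel_order)
--
--     def sort_key(channel):
--         name = channel.get('display_name', '').lower()
--         if name in order_map:
--             return (order_map[name], '')
--         return (n, name)
--
--     return sorted(channels, key=sort_key)
-- ===== Notes on version B (the rewrite author's own statement) =====
-- stated objective: simpler
-- what changed: Replaces the explicit partition into ordered/unordered lists followed by two separate sorts and conditional concatenation with a single stable sorted() call using a composite (rank, name) key.
import Mathlib
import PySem

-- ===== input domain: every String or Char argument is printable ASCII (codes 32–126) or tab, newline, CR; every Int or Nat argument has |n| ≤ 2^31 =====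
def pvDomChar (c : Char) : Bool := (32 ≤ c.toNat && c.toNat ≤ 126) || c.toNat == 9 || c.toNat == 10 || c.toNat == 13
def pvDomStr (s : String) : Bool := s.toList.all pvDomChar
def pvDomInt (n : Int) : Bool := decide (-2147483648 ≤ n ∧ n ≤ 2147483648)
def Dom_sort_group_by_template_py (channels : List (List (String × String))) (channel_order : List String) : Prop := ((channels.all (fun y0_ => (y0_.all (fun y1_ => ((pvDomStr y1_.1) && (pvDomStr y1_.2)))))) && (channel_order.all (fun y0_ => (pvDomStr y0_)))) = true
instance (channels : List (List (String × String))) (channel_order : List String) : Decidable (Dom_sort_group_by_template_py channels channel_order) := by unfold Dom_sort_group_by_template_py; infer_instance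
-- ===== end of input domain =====

-- B replaces A's explicit partition + two sorts + conditional concatenation by ONE stable sort
-- with a composite (rank, name) key; same return value, similar cost (objective: simpler).

-- shared helper: the `order_map` dict comprehension, identical in A and B
def pvOrderMap (channel_order : List String) : PySem.Dict String Int :=
  (PySem.List.enumerate channel_order 0).foldl
    (fun d p => d.insert (PySem.Str.lower p.2) p.1) PySem.Dict.empty

-- ===== PORT A =====
def sort_group_by_template_py (channels : List (List (String × String))) (channel_order : List String) : List (List (String × String)) :=
  if channels.isEmpty || channel_order.isEmpty then channels
  else
    let orderMap := pvOrderMap channel_order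
    -- partition loop over channels
    let acc := channels.foldl
      (fun (acc : List (Int × List (String × String)) × List (List (String × String))) channel =>
        let display_name := PySem.Dict.getD (PySem.Dict.ofList channel) "display_name" ""
        if orderMap.contains (PySem.Str.lower display_name) then
          -- `order_map[display_name.lower()]`: the default 0 is unreachable under the contains guard
          (acc.1 ++ [(PySem.Dict.getD orderMap (PySem.Str.lower display_name) 0, channel)], acc.2)
        else
          (acc.1, acc.2 ++ [channel]))
      ([], [])
    let finalChannels : List (List (String × String)) := []
    let finalChannels := if acc.1 ≠ [] then
        finalChannels ++ (PySem.List.sorted acc.1 (fun x => x.1) false).map (fun x => x.2)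
      else finalChannels
    let finalChannels := if acc.2 ≠ [] then
        finalChannels ++ PySem.List.sorted acc.2
          (fun x => PySem.Str.lower (PySem.Dict.getD (PySem.Dict.ofList x) "display_name" "")) false
      else finalChannels
    finalChannels

-- ===== PORT B =====
def sort_group_by_template_py_alt (channels : List (List (String × String))) (channel_order : List String) : List (List (String × String)) :=
  if channels.isEmpty || channel_order.isEmpty then channels
  else
    let orderMap := pvOrderMap channel_order
    let n : Int := channel_order.length
    PySem.List.sorted2 channels
      (fun channel =>
        let name := PySem.Str.lower (PySem.Dict.getD (PySem.Dict.ofList channel) "display_name" "")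
        if orderMap.contains name then PySem.Dict.getD orderMap name 0 else n)
      (fun channel =>
        let name := PySem.Str.lower (PySem.Dict.getD (PySem.Dict.ofList channel) "display_name" "")
        if orderMap.contains name then "" else name)
      false

-- ===== PRECONDITION & SPEC =====
def Spec_sort_group_by_template_py (channels : List (List (String × String))) (channel_order : List String) (out : List (List (String × String))) : Prop := out = sort_group_by_template_py_alt channels channel_order
instance (channels : List (List (String × String))) (channel_order : List String) (out : List (List (String × String))) : Decidable (Spec_sort_group_by_template_py channels channel_order out) := by unfold Spec_sort_group_by_template_py; infer_instance

-- ===== CLAIM (what is proved, stated in full; the proofs are below) =====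
def Claim_equal_sort_group_by_template_py : Prop := ∀ (channels : List (List (String × String))) (channel_order : List String), Dom_sort_group_by_template_py channels channel_order → Spec_sort_group_by_template_py channels channel_order (sort_group_by_template_py channels channel_order)

-- ===== LEMMAS AND PROOFS =====

-- lowercased display name of a channel
def pvLName (ch : List (String × String)) : String :=
  PySem.Str.lower (PySem.Dict.getD (PySem.Dict.ofList ch) "display_name" "")

-- insertBy: inserting an element that goes before everything in the right part
theorem pv_insertBy_append_right {α : Type} (before : α → α → Bool) (x : α)
    (L R : List α) (h : ∀ r ∈ R, before x r = true) :
    PySem.List.insertBy before x (L ++ R) = PySem.List.insertBy before x L ++ R := by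
  induction L with
  | nil =>
    cases R with
    | nil => rfl
    | cons r rs => simp [PySem.List.insertBy, h r (by simp)]
  | cons y L ih =>
    simp only [List.cons_append, PySem.List.insertBy]
    by_cases hb : before x y = true
    · simp [hb]
    · simp [hb, ih]

-- insertBy: inserting an element that goes after everything in the left part
theorem pv_insertBy_append_left {α : Type} (before : α → α → Bool) (x : α)
    (L R : List α) (h : ∀ l ∈ L, before x l = false) :
    PySem.List.insertBy before x (L ++ R) = L ++ PySem.List.insertBy before x R := by
  induction L with
  | nil => rfl
  | cons y L ih =>
    have hy : before x y = false := h y (by simp)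
    simp only [List.cons_append, PySem.List.insertBy, hy]
    simp only [Bool.false_eq_true, if_false]
    rw [ih (fun l hl => h l (by simp [hl]))]

-- insertBy only looks at `before x ·` on members
theorem pv_insertBy_congr {α : Type} (before before' : α → α → Bool) (x : α)
    (ys : List α) (h : ∀ y ∈ ys, before x y = before' x y) :
    PySem.List.insertBy before x ys = PySem.List.insertBy before' x ys := by
  induction ys with
  | nil => rfl
  | cons y ys ih =>
    simp only [PySem.List.insertBy, h y (by simp)]
    by_cases hb : before' x y = true
    · simp [hb]
    · simp [hb, ih (fun z hz => h z (by simp [hz]))]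

-- insertBy commutes with map when the comparison factors through the map
theorem pv_insertBy_map {α β : Type} (before : β → β → Bool) (g : α → β) (x : α)
    (S : List α) :
    PySem.List.insertBy before (g x) (S.map g)
      = (PySem.List.insertBy (fun a b => before (g a) (g b)) x S).map g := by
  induction S with
  | nil => rfl
  | cons s S ih =>
    simp only [List.map_cons, PySem.List.insertBy]
    by_cases hb : before (g x) (g s) = true
    · simp [hb]
    · simp [hb, ih]

-- sorted commutes with map when the key factors through the map
theorem pv_sorted_map {α β κ : Type} [LT κ] [DecidableLT κ] (key : β → κ) (g : α → β)
    (xs : List α) :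
    PySem.List.sorted (xs.map g) key false
      = (PySem.List.sorted xs (fun a => key (g a)) false).map g := by
  rw [PySem.List.sorted_eq_foldl_insertBy, PySem.List.sorted_eq_foldl_insertBy]
  suffices h : ∀ (T : List α),
      (xs.map g).foldl (fun acc x => PySem.List.insertBy (fun a b => decide (key a < key b)) x acc) (T.map g)
      = (xs.foldl (fun acc x => PySem.List.insertBy (fun a b => decide (key (g a) < key (g b))) x acc) T).map g by
    simpa using h []
  induction xs with
  | nil => intro T; rfl
  | cons x xs ih =>
    intro T
    simp only [List.map_cons, List.foldl_cons]
    rw [pv_insertBy_map, ih]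

theorem pv_sorted_append_singleton {α κ : Type} [LT κ] [DecidableLT κ] (key : α → κ)
    (xs : List α) (x : α) :
    PySem.List.sorted (xs ++ [x]) key false
      = PySem.List.insertBy (fun a b => decide (key a < key b)) x (PySem.List.sorted xs key false) := by
  rw [PySem.List.sorted_eq_foldl_insertBy, PySem.List.sorted_eq_foldl_insertBy]
  simp [List.foldl_append]

theorem pv_sorted2_eq_foldl {α κ₁ κ₂ : Type} [LT κ₁] [DecidableLT κ₁] [LT κ₂] [DecidableLT κ₂]
    (xs : List α) (k1 : α → κ₁) (k2 : α → κ₂) :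
    PySem.List.sorted2 xs k1 k2 false
      = xs.foldl (fun acc x => PySem.List.insertBy
          (fun a b => decide (k1 a < k1 b) || (!decide (k1 b < k1 a) && decide (k2 a < k2 b))) x acc) [] := rfl

-- values stored in the order map lie in [0, len channel_order)
theorem pv_orderMap_get?_bound (channel_order : List String) (s : String) (i : Int)
    (h : (pvOrderMap channel_order).get? s = some i) :
    0 ≤ i ∧ i < (channel_order.length : Int) := by
  suffices hgen : ∀ (xs : List String) (st : Int) (d : PySem.Dict String Int),
      0 ≤ st →
      (∀ s i, d.get? s = some i → 0 ≤ i ∧ i < st) →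
      ∀ s i, ((PySem.List.enumerate xs st).foldl
          (fun d p => d.insert (PySem.Str.lower p.2) p.1) d).get? s = some i →
        0 ≤ i ∧ i < st + (xs.length : Int) by
    have := hgen channel_order 0 PySem.Dict.empty le_rfl
      (by intro s i hsi; simp [PySem.Dict.get?_empty] at hsi) s i h
    simpa using this
  intro xs
  induction xs with
  | nil =>
    intro st d hst hd s i hsi
    simp only [PySem.List.enumerate, List.foldl_nil] at hsi
    have := hd s i hsi
    simpa using ⟨this.1, lt_of_lt_of_le this.2 (by simp)⟩
  | cons x t ih =>
    intro st d hst hd s i hsi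
    have hcons : PySem.List.enumerate (x :: t) st = (st, x) :: PySem.List.enumerate t (st + 1) := rfl
    rw [hcons, List.foldl_cons] at hsi
    have := ih (st + 1) (d.insert (PySem.Str.lower x) st) (by omega)
      (by
        intro s' i' h'
        rw [PySem.Dict.get?_insert] at h'
        by_cases he : s' = PySem.Str.lower x
        · simp [he] at h'
          omega
        · simp [he] at h'
          have := hd s' i' h'
          omega) s i hsi
    constructor
    · exact this.1
    · have : i < st + 1 + (t.length : Int) := this.2
      simp only [List.length_cons]
      push_cast
      omega

theorem pv_contains_getD_lt (channel_order : List String) (s : String)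
    (h : (pvOrderMap channel_order).contains s = true) (a : Int) :
    0 ≤ (pvOrderMap channel_order).getD s a ∧
      (pvOrderMap channel_order).getD s a < (channel_order.length : Int) := by
  rw [PySem.Dict.contains_eq_isSome_get?] at h
  cases hg : (pvOrderMap channel_order).get? s with
  | none => rw [hg] at h; simp at h
  | some v =>
    have := pv_orderMap_get?_bound channel_order s v hg
    simp [PySem.Dict.getD_eq_get?_getD, hg, this]

-- the partition loop of A computes a filter/map pair
theorem pv_loop_eq_filter (om : PySem.Dict String Int)
    (chs : List (List (String × String)))
    (o0 : List (Int × List (String × String))) (u0 : List (List (String × String))) :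
    chs.foldl
      (fun (acc : List (Int × List (String × String)) × List (List (String × String))) channel =>
        let display_name := PySem.Dict.getD (PySem.Dict.ofList channel) "display_name" ""
        if om.contains (PySem.Str.lower display_name) then
          (acc.1 ++ [(PySem.Dict.getD om (PySem.Str.lower display_name) 0, channel)], acc.2)
        else
          (acc.1, acc.2 ++ [channel]))
      (o0, u0)
    = (o0 ++ (chs.filter (fun c => om.contains (pvLName c))).map
          (fun c => (PySem.Dict.getD om (pvLName c) 0, c)),
       u0 ++ chs.filter (fun c => !om.contains (pvLName c))) := by
  induction chs generalizing o0 u0 with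
  | nil => simp
  | cons c chs ih =>
    simp only [List.foldl_cons]
    by_cases hc : om.contains (pvLName c) = true
    · simp only [pvLName] at hc
      simp [hc, ih, pvLName]
    · simp only [pvLName] at hc
      rw [Bool.not_eq_true] at hc
      simp [hc, ih, pvLName]

-- the composite-key single sort splits into the two sorts of A
theorem pv_main (channel_order : List String) (chs : List (List (String × String))) :
    PySem.List.sorted2 chs
      (fun channel =>
        if (pvOrderMap channel_order).contains (pvLName channel) then
          PySem.Dict.getD (pvOrderMap channel_order) (pvLName channel) 0
        else (channel_order.length : Int))
      (fun channel =>
        if (pvOrderMap channel_order).contains (pvLName channel) then "" else pvLName channel)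
      false
    = PySem.List.sorted (chs.filter (fun c => (pvOrderMap channel_order).contains (pvLName c)))
        (fun c => PySem.Dict.getD (pvOrderMap channel_order) (pvLName c) 0) false
      ++ PySem.List.sorted (chs.filter (fun c => !(pvOrderMap channel_order).contains (pvLName c)))
          (fun c => pvLName c) false := by
  induction chs using List.reverseRecOn with
  | nil => rfl
  | append_singleton chs c ih =>
    rw [pv_sorted2_eq_foldl] at ih ⊢
    rw [List.foldl_append, List.foldl_cons, List.foldl_nil, ih]
    by_cases hc : (pvOrderMap channel_order).contains (pvLName c) = true
    · -- c is in the template: it is inserted into the left (ordered) block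
      rw [pv_insertBy_append_right _ _ _ _ ?hr]
      case hr =>
        intro r hr
        have hrm := ((PySem.List.mem_sorted _ _ _ _).1 hr)
        have hrp : (pvOrderMap channel_order).contains (pvLName r) = false := by
          have := List.of_mem_filter hrm
          simpa using this
        have hb := pv_contains_getD_lt channel_order (pvLName c) hc 0
        simp only [hc, hrp, if_true, if_false, Bool.false_eq_true]
        simp [hb.2]
      · rw [pv_insertBy_congr _
            (fun a b => decide (PySem.Dict.getD (pvOrderMap channel_order) (pvLName a) 0
              < PySem.Dict.getD (pvOrderMap channel_order) (pvLName b) 0)) _ _ ?hcg]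
        case hcg =>
          intro y hy
          have hyp : (pvOrderMap channel_order).contains (pvLName y) = true := by
            have := List.of_mem_filter ((PySem.List.mem_sorted _ _ _ _).1 hy)
            simpa using this
          simp only [hc, hyp, if_true]
          simp
        rw [List.filter_append, List.filter_append]
        simp only [List.filter_cons, hc, Bool.not_true, List.filter_nil, Bool.false_eq_true,
          if_false, if_true, List.append_nil]
        rw [pv_sorted_append_singleton]
    · -- c is not in the template: it is inserted into the right (name-sorted) block
      rw [Bool.not_eq_true] at hc
      rw [pv_insertBy_append_left _ _ _ _ ?hl]
      case hl =>
        intro l hl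
        have hlp : (pvOrderMap channel_order).contains (pvLName l) = true := by
          have := List.of_mem_filter ((PySem.List.mem_sorted _ _ _ _).1 hl)
          simpa using this
        have hb := pv_contains_getD_lt channel_order (pvLName l) hlp 0
        simp only [hc, hlp, if_true, Bool.false_eq_true, if_false]
        simp [not_lt_of_gt hb.2]
      · rw [pv_insertBy_congr _
            (fun a b => decide (pvLName a < pvLName b)) _ _ ?hcg]
        case hcg =>
          intro y hy
          have hyp : (pvOrderMap channel_order).contains (pvLName y) = false := by
            have := List.of_mem_filter ((PySem.List.mem_sorted _ _ _ _).1 hy)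
            simpa using this
          simp only [hc, hyp, if_false, Bool.false_eq_true]
          simp
        rw [List.filter_append, List.filter_append]
        simp only [List.filter_cons, hc, Bool.not_false, List.filter_nil, Bool.false_eq_true,
          if_false, if_true, List.append_nil]
        rw [pv_sorted_append_singleton]

-- ===== VERDICT (by name: the statement is the Claim_ definition above) =====
theorem sort_group_by_template_py_spec : Claim_equal_sort_group_by_template_py := by
  intro channels channel_order _
  unfold Spec_sort_group_by_template_py sort_group_by_template_py sort_group_by_template_py_alt
  by_cases hg : (channels.isEmpty || channel_order.isEmpty) = true
  · simp only [hg, if_true]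
  · simp only [hg, Bool.false_eq_true, if_false]
    have hloop := pv_loop_eq_filter (pvOrderMap channel_order) channels [] []
    have hm := pv_main channel_order channels
    simp only [pvLName] at hloop hm
    simp only [List.nil_append] at hloop
    rw [hloop, hm]
    clear hloop hm
    split_ifs <;>
      simp_all [pv_sorted_map, List.map_map, Function.comp_def, PySem.List.sorted_eq_nil_iff,
        List.map_eq_nil_iff]
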